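-- pv_equiv track=rewrite | github.com/HPDL-Group/Merak | process_monitor/tests/test_pytorch_config.py | _simulate_rank_calculation
-- ===== SOURCE A (Python) =====
-- def extract_node_name(worker_id):
--     """Extract node name from worker ID (e.g., 'gn6' from 'gn6-1')."""
--     if '-' in worker_id:
--         return worker_id.rsplit('-', 1)[0]
--     return worker_id
--
-- def _simulate_rank_calculation(
--
--     worker_id,
--     group_workers,
--     master_addr,
--     world_size
-- ):
--     """
--     Simulate the rank calculation logic from app.py.
--     Returns: (rank, local_rank, node_rank)
--     """
--     master_node = extract_node_name(master_addr) if '-' in master_addr else master_addr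
--     current_node = extract_node_name(worker_id)
--
--     unique_nodes = {}
--     for wid in group_workers:
--         node_name = extract_node_name(wid)
--         if node_name not in unique_nodes:
--             unique_nodes[node_name] = []
--         unique_nodes[node_name].append(wid)
--
--     sorted_nodes = sorted(unique_nodes.keys())
--
--     # Ensure master node is always first (the fix we made)
--     if master_node in sorted_nodes:
--         master_idx = sorted_nodes.index(master_node)
--         if master_idx != 0:
--             sorted_nodes.pop(master_idx)
--             sorted_nodes.insert(0, master_node)
--
--     node_rank = sorted_nodes.index(current_node)
--
--     sorted_workers = []
--     for node in sorted_nodes: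
--         sorted_workers.extend(sorted(unique_nodes.get(node, [])))
--
--     rank = None
--     local_rank = 0
--
--     if worker_id in sorted_workers:
--         worker_idx = sorted_workers.index(worker_id)
--         if worker_idx < world_size:
--             rank = worker_idx
--
--             # Calculate local_rank based on workers on the same node within the group
--             current_node_workers = sorted(unique_nodes.get(current_node, []))
--             local_rank = current_node_workers.index(worker_id)
--
--     return rank, local_rank, node_rank
-- ===== SOURCE B (Python) =====
-- def extract_node_name(worker_id):
--     """Extract node name from worker ID (e.g., 'gn6' from 'gn6-1')."""
--     if '-' in worker_id:
--         return worker_id.rsplit('-', 1)[0]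
--     return worker_id
--
-- def _simulate_rank_calculation(worker_id, group_workers, master_addr, world_size):
--     master_node = extract_node_name(master_addr) if '-' in master_addr else master_addr
--     current_node = extract_node_name(worker_id)
--
--     unique_nodes = {}
--     for wid in group_workers:
--         unique_nodes.setdefault(extract_node_name(wid), []).append(wid)
--
--     sorted_nodes = sorted(unique_nodes.keys())
--
--     # Ensure master node is always first
--     if master_node in sorted_nodes:
--         master_idx = sorted_nodes.index(master_node)
--         if master_idx != 0:
--             sorted_nodes.pop(master_idx)
--             sorted_nodes.insert(0, master_node)
--
--     node_rank = sorted_nodes.index(current_node)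
--
--     # Prefix-count accumulation: no flat sorted_workers list, no global .index scan.
--     current_node_workers = sorted(unique_nodes.get(current_node, []))
--
--     rank = None
--     local_rank = 0
--     if worker_id in current_node_workers:
--         offset = 0
--         for node in sorted_nodes:
--             if node == current_node:
--                 break
--             offset += len(unique_nodes.get(node, []))
--         li = current_node_workers.index(worker_id)
--         worker_idx = offset + li
--         if worker_idx < world_size:
--             rank = worker_idx
--             local_rank = li
--     return rank, local_rank, node_rank
-- ===== Notes on version B (the rewrite author's own statement) =====
-- stated objective: alternative
-- what changed: B keeps the node-map build, sorted_nodes construction and node_rank lookup, but replaces A's flattened sorted_workers list and its global .index scan by a prefix-count offset (sum of per-node group sizes before the worker's node) plus the worker's index inside its own node's sorted list.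
import Mathlib
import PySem

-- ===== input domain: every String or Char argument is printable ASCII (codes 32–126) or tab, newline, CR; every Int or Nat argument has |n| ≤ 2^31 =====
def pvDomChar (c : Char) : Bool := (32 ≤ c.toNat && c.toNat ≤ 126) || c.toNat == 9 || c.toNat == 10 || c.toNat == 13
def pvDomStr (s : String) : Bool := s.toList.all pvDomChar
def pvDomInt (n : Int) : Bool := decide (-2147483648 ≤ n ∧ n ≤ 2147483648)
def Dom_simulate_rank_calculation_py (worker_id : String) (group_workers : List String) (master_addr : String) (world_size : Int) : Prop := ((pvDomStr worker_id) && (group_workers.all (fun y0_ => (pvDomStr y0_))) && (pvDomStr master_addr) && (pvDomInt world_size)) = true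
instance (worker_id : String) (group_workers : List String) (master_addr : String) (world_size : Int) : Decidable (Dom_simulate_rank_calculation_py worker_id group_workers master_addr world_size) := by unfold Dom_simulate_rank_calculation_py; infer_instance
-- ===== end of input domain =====

-- B replaces A's flattened sorted_workers list and its global .index scan by a per-node
-- prefix-count offset plus the index within the worker's own node (objective: alternative decomposition).

-- ===== PORT A =====
-- hand port of worker_id.rsplit('-', 1)[0]: the characters strictly before the LAST '-';
-- exact, since the separator is the single ASCII char '-' (so "'-' in s" is char membership).
def pvExtractChars (l : List Char) : List Char :=
  if '-' ∈ l then ((l.reverse.dropWhile (fun c => c != '-')).drop 1).reverse else l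

-- extract_node_name (shared helper of both Pythons)
def pvExtract (s : String) : String := String.ofList (pvExtractChars s.toList)

-- the unique_nodes dict-building loop (identical lines in A and B: setdefault-and-append)
def pvBuildNodes (group_workers : List String) : PySem.Dict String (List String) :=
  group_workers.foldl (fun d wid => d.modify (pvExtract wid) [] (fun l => l ++ [wid])) PySem.Dict.empty

-- sorted(unique_nodes.keys()) followed by the master-first pop/insert reordering (identical in A and B)
def pvSortedNodes (d : PySem.Dict String (List String)) (master_node : String) : List String :=
  let sn := PySem.List.sorted d.keys (fun x => x) false
  if master_node ∈ sn then
    match PySem.List.index? sn master_node with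
    | some master_idx =>
        if master_idx ≠ 0 then
          match PySem.List.pop? sn (master_idx : Int) with
          | some (_, rest) => PySem.List.insert rest 0 master_node
          | none => sn
        else sn
    | none => sn
  else sn

def simulate_rank_calculation_py (worker_id : String) (group_workers : List String) (master_addr : String) (world_size : Int) : Option Int × Int × Int :=
  let master_node := if '-' ∈ master_addr.toList then pvExtract master_addr else master_addr
  let current_node := pvExtract worker_id
  let d := pvBuildNodes group_workers
  let sorted_nodes := pvSortedNodes d master_node
  -- node_rank = sorted_nodes.index(current_node); Pre_ guarantees membership (Python raises ValueError otherwise)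
  let node_rank : Int := ((PySem.List.index? sorted_nodes current_node).getD 0 : Nat)
  let sorted_workers := sorted_nodes.foldl (fun acc node => acc ++ PySem.List.sorted (d.getD node []) (fun x => x) false) []
  if worker_id ∈ sorted_workers then
    let worker_idx : Int := ((PySem.List.index? sorted_workers worker_id).getD 0 : Nat)
    if worker_idx < world_size then
      let current_node_workers := PySem.List.sorted (d.getD current_node []) (fun x => x) false
      (some worker_idx, ((PySem.List.index? current_node_workers worker_id).getD 0 : Nat), node_rank)
    else (none, 0, node_rank)
  else (none, 0, node_rank)

-- ===== PORT B =====
-- the for/break loop accumulating len(unique_nodes.get(node, [])) over sorted_nodes before current_node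
def pvOffset (d : PySem.Dict String (List String)) (current_node : String) : List String → Int
  | [] => 0
  | node :: rest =>
      if node = current_node then 0
      else ((d.getD node []).length : Int) + pvOffset d current_node rest

def simulate_rank_calculation_py_alt (worker_id : String) (group_workers : List String) (master_addr : String) (world_size : Int) : Option Int × Int × Int :=
  let master_node := if '-' ∈ master_addr.toList then pvExtract master_addr else master_addr
  let current_node := pvExtract worker_id
  let d := pvBuildNodes group_workers
  let sorted_nodes := pvSortedNodes d master_node
  let node_rank : Int := ((PySem.List.index? sorted_nodes current_node).getD 0 : Nat)
  let current_node_workers := PySem.List.sorted (d.getD current_node []) (fun x => x) false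
  if worker_id ∈ current_node_workers then
    let offset := pvOffset d current_node sorted_nodes
    let li : Nat := (PySem.List.index? current_node_workers worker_id).getD 0
    let worker_idx : Int := offset + (li : Int)
    if worker_idx < world_size then (some worker_idx, (li : Int), node_rank)
    else (none, 0, node_rank)
  else (none, 0, node_rank)

-- ===== PRECONDITION & SPEC =====
-- Pre_ excludes exactly the inputs where Python A raises ValueError: sorted_nodes.index(current_node)
-- fails when worker_id's node name is not the node name of any group worker (B raises there too).
def Pre_simulate_rank_calculation_py (worker_id : String) (group_workers : List String) (master_addr : String) (world_size : Int) : Prop :=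
  pvExtract worker_id ∈ group_workers.map pvExtract
instance (worker_id : String) (group_workers : List String) (master_addr : String) (world_size : Int) : Decidable (Pre_simulate_rank_calculation_py worker_id group_workers master_addr world_size) := by unfold Pre_simulate_rank_calculation_py; infer_instance

def pvWitness_simulate_rank_calculation_py : String × List String × String × Int :=
  ("gn1-0", ["gn1-0", "gn1-1", "gn2-0"], "gn2", 3)

def Spec_simulate_rank_calculation_py (worker_id : String) (group_workers : List String) (master_addr : String) (world_size : Int) (out : Option Int × Int × Int) : Prop := out = simulate_rank_calculation_py_alt worker_id group_workers master_addr world_size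
instance (worker_id : String) (group_workers : List String) (master_addr : String) (world_size : Int) (out : Option Int × Int × Int) : Decidable (Spec_simulate_rank_calculation_py worker_id group_workers master_addr world_size out) := by unfold Spec_simulate_rank_calculation_py; infer_instance

-- ===== CLAIM (what is proved, stated in full; the proofs are below) =====
def Claim_equal_simulate_rank_calculation_py : Prop := ∀ (worker_id : String) (group_workers : List String) (master_addr : String) (world_size : Int), Dom_simulate_rank_calculation_py worker_id group_workers master_addr world_size → Pre_simulate_rank_calculation_py worker_id group_workers master_addr world_size → Spec_simulate_rank_calculation_py worker_id group_workers master_addr world_size (simulate_rank_calculation_py worker_id group_workers master_addr world_size)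

-- ===== LEMMAS AND PROOFS =====

-- the per-node segment A sorts and concatenates (proof-only abbreviation)
def pvSeg (d : PySem.Dict String (List String)) (n : String) : List String :=
  PySem.List.sorted (d.getD n []) (fun x => x) false

-- loop invariant of the unique_nodes building loop: keys are distinct, keys are exactly the
-- node names of the processed workers, and every stored worker's node name is its key
lemma pvBuild_inv (gw : List String) :
    ∀ (d : PySem.Dict String (List String)), d.keys.Nodup →
    (∀ n w, w ∈ d.getD n [] → pvExtract w = n) →
    (gw.foldl (fun d wid => d.modify (pvExtract wid) [] (fun l => l ++ [wid])) d).keys.Nodup ∧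
    (∀ n, n ∈ (gw.foldl (fun d wid => d.modify (pvExtract wid) [] (fun l => l ++ [wid])) d).keys ↔
      n ∈ d.keys ∨ n ∈ gw.map pvExtract) ∧
    (∀ n w, w ∈ (gw.foldl (fun d wid => d.modify (pvExtract wid) [] (fun l => l ++ [wid])) d).getD n [] → pvExtract w = n) := by
  induction gw with
  | nil => intro d h1 h2; simpa using ⟨h1, h2⟩
  | cons wid rest ih =>
    intro d h1 h2
    simp only [List.foldl_cons]
    have h1' : (d.modify (pvExtract wid) [] (fun l => l ++ [wid])).keys.Nodup := by
      rw [PySem.Dict.keys_modify]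
      exact PySem.Dict.nodup_keys_insert _ _ _ h1
    have h2' : ∀ n w, w ∈ (d.modify (pvExtract wid) [] (fun l => l ++ [wid])).getD n [] → pvExtract w = n := by
      intro n w hw
      by_cases hn : n = pvExtract wid
      · subst hn
        rw [PySem.Dict.getD_modify_self] at hw
        rcases List.mem_append.mp hw with h | h
        · exact h2 _ _ h
        · simp at h; subst h; rfl
      · rw [PySem.Dict.getD_modify_of_ne _ _ _ hn] at hw
        exact h2 _ _ hw
    obtain ⟨a, b, c⟩ := ih _ h1' h2'
    refine ⟨a, ?_, c⟩
    intro n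
    rw [b n]
    have : n ∈ (d.modify (pvExtract wid) [] (fun l => l ++ [wid])).keys ↔ n = pvExtract wid ∨ n ∈ d.keys := by
      rw [PySem.Dict.keys_modify]; exact PySem.Dict.mem_keys_insert _ _ _ _
    rw [this]
    simp
    tauto

-- the master-first reordering is a permutation of the sorted key list
lemma pvSortedNodes_perm (d : PySem.Dict String (List String)) (m : String) :
    (pvSortedNodes d m).Perm d.keys := by
  unfold pvSortedNodes
  have hperm := PySem.List.sorted_perm d.keys (fun x => x) false
  set sn := PySem.List.sorted d.keys (fun x => x) false with hsn
  by_cases hm : m ∈ sn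
  · simp only [if_pos hm]
    rcases ho : PySem.List.index? sn m with _ | i
    · exact hperm
    · obtain ⟨hk, hv, _⟩ := PySem.List.getElem_of_index?_eq_some ho
      by_cases hi : i ≠ 0
      · simp only [if_pos hi]
        rw [PySem.List.pop?_natCast sn i hk]
        simp only [PySem.List.insert_zero]
        have : (sn[i] :: sn.eraseIdx i).Perm sn := List.getElem_cons_eraseIdx_perm hk
        rw [hv] at this
        exact this.trans hperm
      · simp only [if_neg hi]; exact hperm
  · simp only [if_neg hm]; exact hperm

lemma pv_index?_append_of_not_mem {l : List String} (t : List String) {v : String} (h : v ∉ l) :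
    PySem.List.index? (l ++ t) v = (PySem.List.index? t v).map (· + l.length) := by
  induction l with
  | nil =>
    rw [List.nil_append]
    cases PySem.List.index? t v <;> simp
  | cons x xs ih =>
    have hx : x ≠ v := by intro e; exact h (by simp [e])
    have hxs : v ∉ xs := fun e => h (by simp [e])
    rw [List.cons_append, PySem.List.index?_cons_of_ne _ hx, ih hxs]
    cases PySem.List.index? t v
    · simp
    · simp; omega

lemma pv_mem_seg (d : PySem.Dict String (List String)) (worker n : String)
    (hseg : ∀ n w, w ∈ d.getD n [] → pvExtract w = n) (hw : worker ∈ pvSeg d n) :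
    pvExtract worker = n := by
  rw [pvSeg, PySem.List.mem_sorted] at hw
  exact hseg _ _ hw

-- worker_id occurs in the flat concatenation iff it occurs in its own node's segment
lemma pv_mem_flat (d : PySem.Dict String (List String)) (worker current : String)
    (hseg : ∀ n w, w ∈ d.getD n [] → pvExtract w = n) (hwc : pvExtract worker = current)
    {ns : List String} (hc : current ∈ ns) :
    worker ∈ ns.flatMap (pvSeg d) ↔ worker ∈ pvSeg d current := by
  constructor
  · intro h
    obtain ⟨n, hn, hw⟩ := List.mem_flatMap.mp h
    have := pv_mem_seg d worker n hseg hw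
    rw [← hwc, this] at *
    rwa [this] at hw
  · intro h
    exact List.mem_flatMap.mpr ⟨current, hc, h⟩

-- A's first-occurrence index in the flat list = B's prefix-count offset + the in-segment index
lemma pv_idx_flat (d : PySem.Dict String (List String)) (worker current : String)
    (hseg : ∀ n w, w ∈ d.getD n [] → pvExtract w = n) (hwc : pvExtract worker = current) :
    ∀ ns : List String, ns.Nodup → current ∈ ns → worker ∈ pvSeg d current →
    ∃ li k, PySem.List.index? (pvSeg d current) worker = some li ∧
      PySem.List.index? (ns.flatMap (pvSeg d)) worker = some k ∧
      (k : Int) = pvOffset d current ns + (li : Int) := by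
  intro ns
  induction ns with
  | nil => intro _ hc; exact absurd hc (List.not_mem_nil)
  | cons n rest ih =>
    intro hnd hc hw
    obtain ⟨li, hli⟩ := Option.isSome_iff_exists.mp ((PySem.List.index?_isSome_iff _ _).mpr hw)
    by_cases hn : n = current
    · subst hn
      refine ⟨li, li, hli, ?_, ?_⟩
      · rw [List.flatMap_cons, PySem.List.index?_append_of_mem _ hw, hli]
      · simp [pvOffset]
    · have hwn : worker ∉ pvSeg d n := by
        intro h
        have := pv_mem_seg d worker n hseg h
        rw [hwc] at this
        exact hn this.symm
      have hc' : current ∈ rest := by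
        rcases List.mem_cons.mp hc with h | h
        · exact absurd h.symm hn
        · exact h
      obtain ⟨li', k', h1, h2, h3⟩ := ih (List.Nodup.of_cons hnd) hc' hw
      refine ⟨li', k' + (pvSeg d n).length, h1, ?_, ?_⟩
      · rw [List.flatMap_cons, pv_index?_append_of_not_mem _ hwn, h2]; rfl
      · have hlen : (pvSeg d n).length = (d.getD n []).length := PySem.List.length_sorted _ _ _
        rw [pvOffset, if_neg hn]
        push_cast [hlen]
        omega

-- ===== VERDICT (by name: the statement is the Claim_ definition above) =====
theorem simulate_rank_calculation_py_spec : Claim_equal_simulate_rank_calculation_py := by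
  intro worker_id group_workers master_addr world_size _ hpre
  unfold Spec_simulate_rank_calculation_py
  obtain ⟨hnd, hmem, hseg⟩ := pvBuild_inv group_workers PySem.Dict.empty
      (by rw [PySem.Dict.keys_empty]; exact List.nodup_nil)
      (by intro n w hw; rw [PySem.Dict.getD_empty] at hw; exact absurd hw (List.not_mem_nil))
  rw [← pvBuildNodes] at hnd hseg
  have hmem' : ∀ n, n ∈ (pvBuildNodes group_workers).keys ↔ n ∈ group_workers.map pvExtract := by
    intro n
    rw [pvBuildNodes, hmem n, PySem.Dict.keys_empty]
    simp
  simp only [simulate_rank_calculation_py, simulate_rank_calculation_py_alt]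
  set mn := (if '-' ∈ master_addr.toList then pvExtract master_addr else master_addr) with hmn
  set d := pvBuildNodes group_workers with hd
  set current := pvExtract worker_id with hcur
  set sns := pvSortedNodes d mn with hsns
  have hperm := pvSortedNodes_perm d mn
  have hsnd : sns.Nodup := hperm.nodup_iff.mpr hnd
  have hcin : current ∈ sns := by
    rw [hperm.mem_iff, hmem']
    exact hpre
  rw [PySem.List.foldl_append_eq_flatMap, List.nil_append]
  have hflat : (sns.flatMap fun node => PySem.List.sorted (d.getD node []) (fun x => x) false)
      = sns.flatMap (pvSeg d) := rfl
  rw [hflat]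
  rw [show PySem.List.sorted (d.getD current []) (fun x => x) false = pvSeg d current from rfl]
  by_cases hw : worker_id ∈ pvSeg d current
  · obtain ⟨li, k, h1, h2, h3⟩ := pv_idx_flat d worker_id current hseg hcur.symm sns hsnd hcin hw
    rw [if_pos ((pv_mem_flat d worker_id current hseg hcur.symm hcin).mpr hw), if_pos (show worker_id ∈ pvSeg d current from hw)]
    rw [h2, h1]
    simp only [Option.getD_some]
    rw [← h3]
  · rw [if_neg (fun h => hw ((pv_mem_flat d worker_id current hseg hcur.symm hcin).mp h)),
        if_neg (show worker_id ∉ pvSeg d current from hw)]
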